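-- pv_equiv track=rewrite | github.com/eggplants/doonroom_db | sqlite_mysql_conv.py | replace_quotes
-- ===== SOURCE A (Python) =====
-- def replace_quotes(line: str) -> str:
--     """Fix differences of escape quotes."""
--     in_string = False
--     newLine = ""
--     for c in line:
--         if not in_string and c == "'":
--             in_string = True
--         elif not in_string and c == '"':
--             newLine += "`"
--             continue
--         elif c == "'":
--             in_string = False
--
--         newLine += c
--
--     return newLine
-- ===== SOURCE B (Python) =====
-- def replace_quotes(line: str) -> str:
--     """Fix differences of escape quotes (split-on-quote reimplementation)."""
--     parts = line.split("'")
--     out = []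
--     even = True
--     for p in parts:
--         out.append(p.replace('"', '`') if even else p)
--         even = not even
--     return "'".join(out)
-- ===== Notes on version B (the rewrite author's own statement) =====
-- stated objective: idiomatic
-- what changed: Replaced the per-character in_string state machine with split on single quotes, replacing double quotes with backticks only in the even (outside-string) segments, then rejoining.
import Mathlib
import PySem

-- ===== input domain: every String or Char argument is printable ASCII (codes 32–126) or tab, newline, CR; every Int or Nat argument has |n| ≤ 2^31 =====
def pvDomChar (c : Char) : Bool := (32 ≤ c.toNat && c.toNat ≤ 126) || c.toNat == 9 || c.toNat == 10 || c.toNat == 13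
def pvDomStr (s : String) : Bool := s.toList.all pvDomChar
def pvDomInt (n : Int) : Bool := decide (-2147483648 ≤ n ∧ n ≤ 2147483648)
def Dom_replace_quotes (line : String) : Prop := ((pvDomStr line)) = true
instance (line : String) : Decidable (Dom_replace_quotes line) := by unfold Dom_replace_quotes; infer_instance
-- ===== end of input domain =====

-- B replaces A's per-character in_string state machine by split-on-'\''/replace-in-even-segments/join (idiomatic, same cost).

-- ===== PORT A =====
-- the loop body of A: state = (in_string, newLine)
def pvStepA (st : Bool × List Char) (c : Char) : Bool × List Char :=
  if !st.1 && c == '\'' then (true, st.2 ++ [c])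
  else if !st.1 && c == '"' then (st.1, st.2 ++ ['`'])   -- 'continue': only "`" appended
  else if c == '\'' then (false, st.2 ++ [c])
  else (st.1, st.2 ++ [c])

def replace_quotes (line : String) : String :=
  String.ofList (line.toList.foldl pvStepA (false, [])).2

-- ===== PORT B =====
-- Source B: replace '"' by '`' in the even-indexed (outside-string) segments, alternating flag
def pvAltMap : List (List Char) → Bool → List (List Char)
  | [], _ => []
  | p :: ps, even => (if even then PySem.Chars.replace p ['"'] ['`'] else p) :: pvAltMap ps (!even)

def replace_quotes_alt (line : String) : String :=
  String.ofList (PySem.Chars.join ['\''] (pvAltMap (PySem.Chars.splitOn line.toList ['\'']) true))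

-- ===== PRECONDITION & SPEC =====
def Spec_replace_quotes (line : String) (out : String) : Prop := out = replace_quotes_alt line
instance (line : String) (out : String) : Decidable (Spec_replace_quotes line out) := by unfold Spec_replace_quotes; infer_instance

-- ===== CLAIM (what is proved, stated in full; the proofs are below) =====
def Claim_equal_replace_quotes : Prop := ∀ (line : String), Dom_replace_quotes line → Spec_replace_quotes line (replace_quotes line)

-- ===== LEMMAS AND PROOFS =====

-- direct-recursion form of A's loop (first arg = in_string)
def pvGoA : Bool → List Char → List Char
  | _, [] => []
  | b, c :: cs =>
    if !b && c == '\'' then c :: pvGoA true cs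
    else if !b && c == '"' then '`' :: pvGoA b cs
    else if c == '\'' then c :: pvGoA false cs
    else c :: pvGoA b cs

-- structural form of line.split("'") with an accumulated current segment
def pvSplit : List Char → List Char → List (List Char)
  | pre, [] => [pre]
  | pre, c :: rest => if c == '\'' then pre :: pvSplit [] rest else pvSplit (pre ++ [c]) rest

def pvMapC (c : Char) : Char := if c == '"' then '`' else c

theorem pvFoldA (cs : List Char) : ∀ (b : Bool) (acc : List Char),
    (cs.foldl pvStepA (b, acc)).2 = acc ++ pvGoA b cs := by
  induction cs with
  | nil => intro b acc; simp [pvGoA]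
  | cons c cs ih =>
    intro b acc
    simp only [List.foldl_cons, pvStepA, pvGoA]
    split_ifs <;> simp [ih]

theorem pvReplaceGo (l : List Char) : ∀ (fuel : Nat) (acc : List Char), l.length ≤ fuel →
    PySem.Chars.replace.go ['"'] ['`'] fuel l acc = acc.reverse ++ l.map pvMapC := by
  induction l with
  | nil => intro fuel acc _; cases fuel <;> simp [PySem.Chars.replace.go]
  | cons c t ih =>
    intro fuel acc h
    cases fuel with
    | zero => simp at h
    | succ f =>
      have ht : t.length ≤ f := by simp only [List.length_cons] at h; omega
      simp only [PySem.Chars.replace.go, List.isPrefixOf]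
      by_cases hc : c = '"'
      · subst hc
        simp only [beq_self_eq_true, Bool.true_and, if_true, List.drop_succ_cons, List.drop_zero,
          List.length_cons, List.length_nil]
        rw [ih f _ ht]
        simp [pvMapC]
      · have hcc : ('"' == c) = false := by simp [beq_eq_false_iff_ne]; exact fun e => hc e.symm
        simp only [hcc, Bool.false_and, Bool.false_eq_true, if_false]
        rw [ih f _ ht]
        simp [pvMapC, hc]

theorem pvReplaceEq (p : List Char) :
    PySem.Chars.replace p ['"'] ['`'] = p.map pvMapC := by
  simp [PySem.Chars.replace, pvReplaceGo p p.length [] (Nat.le_refl _)]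

theorem pvSplitGo (l : List Char) : ∀ (fuel : Nat) (cur : List Char) (acc : List (List Char)),
    l.length < fuel →
    PySem.Chars.splitOn.go ['\''] fuel l cur acc = acc.reverse ++ pvSplit cur.reverse l := by
  induction l with
  | nil =>
    intro fuel cur acc h
    cases fuel with
    | zero => simp at h
    | succ f => simp [PySem.Chars.splitOn.go, pvSplit]
  | cons c t ih =>
    intro fuel cur acc h
    cases fuel with
    | zero => simp at h
    | succ f =>
      have ht : t.length < f := by simp only [List.length_cons] at h; omega
      simp only [PySem.Chars.splitOn.go, List.isPrefixOf]
      by_cases hc : c = '\''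
      · subst hc
        simp only [beq_self_eq_true, Bool.true_and, if_true, List.drop_succ_cons, List.drop_zero,
          List.length_cons, List.length_nil]
        rw [ih f [] _ ht]
        simp [pvSplit]
      · have hcc : ('\'' == c) = false := by simp [beq_eq_false_iff_ne]; exact fun e => hc e.symm
        have hcc2 : (c == '\'') = false := by simp [beq_eq_false_iff_ne]; exact hc
        simp only [hcc, Bool.false_and, Bool.false_eq_true, if_false]
        rw [ih f (c :: cur) acc ht]
        simp [pvSplit, hcc2]

theorem pvSplitOnEq (l : List Char) :
    PySem.Chars.splitOn l ['\''] = pvSplit [] l := by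
  simp [PySem.Chars.splitOn, pvSplitGo l (l.length + 1) [] [] (Nat.lt_succ_self _)]

-- a nonempty current segment only extends the head of the split
theorem pvSplitPre (l : List Char) : ∀ (pre : List Char),
    pvSplit pre l = (pre ++ (pvSplit [] l).headI) :: (pvSplit [] l).tail := by
  induction l with
  | nil => intro pre; simp [pvSplit]
  | cons c rest ih =>
    intro pre
    by_cases hc : c = '\''
    · subst hc; simp [pvSplit]
    · have hcc : (c == '\'') = false := by simp [beq_eq_false_iff_ne]; exact hc
      rw [show pvSplit pre (c :: rest) = pvSplit (pre ++ [c]) rest from by simp [pvSplit, hcc],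
          show pvSplit [] (c :: rest) = pvSplit [c] rest from by simp [pvSplit, hcc],
          ih (pre ++ [c]), ih [c]]
      simp

theorem pvJoinConsHead (x : Char) (a : List Char) (t : List (List Char)) :
    PySem.Chars.join ['\''] ((x :: a) :: t) = x :: PySem.Chars.join ['\''] (a :: t) := by
  cases t with
  | nil => simp [PySem.Chars.join_singleton]
  | cons b r => simp [PySem.Chars.join_cons_cons]

theorem pvMain (l : List Char) : ∀ (b : Bool),
    pvGoA b l = PySem.Chars.join ['\''] (pvAltMap (pvSplit [] l) (!b)) := by
  induction l with
  | nil =>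
    intro b
    cases b <;> simp [pvGoA, pvSplit, pvAltMap, pvReplaceEq, PySem.Chars.join_singleton]
  | cons c rest ih =>
    intro b
    obtain ⟨h, t, hS⟩ : ∃ h t, pvSplit [] rest = h :: t := ⟨_, _, pvSplitPre rest []⟩
    by_cases hc : c = '\''
    · subst hc
      have hsplit : pvSplit [] ('\'' :: rest) = [] :: pvSplit [] rest := by simp [pvSplit]
      have hgo : pvGoA b ('\'' :: rest) = '\'' :: pvGoA (!b) rest := by
        cases b <;> simp [pvGoA]
      rw [hgo, hsplit, ih (!b), hS]
      cases b <;> simp [pvAltMap, pvReplaceEq, PySem.Chars.join_cons_cons]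
    · have hcc : (c == '\'') = false := by simp [beq_eq_false_iff_ne]; exact hc
      have h1 : pvSplit [] (c :: rest) = pvSplit [c] rest := by simp [pvSplit, hcc]
      have h2 : pvSplit [c] rest = (c :: h) :: t := by
        rw [pvSplitPre rest [c], hS]
        simp
      cases b with
      | false =>
        have hgo : pvGoA false (c :: rest) = pvMapC c :: pvGoA false rest := by
          by_cases hq : c = '"' <;> simp [pvGoA, hcc, hq, pvMapC]
        rw [hgo, ih false, h1, h2, hS]
        simp only [pvAltMap, Bool.not_false, Bool.not_true, if_true, pvReplaceEq, List.map_cons]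
        rw [pvJoinConsHead]
      | true =>
        have hgo : pvGoA true (c :: rest) = c :: pvGoA true rest := by
          simp [pvGoA, hcc]
        rw [hgo, ih true, h1, h2, hS]
        simp only [pvAltMap, Bool.not_true, Bool.not_false, Bool.false_eq_true, if_false]
        rw [pvJoinConsHead]

-- ===== VERDICT (by name: the statement is the Claim_ definition above) =====
theorem replace_quotes_spec : Claim_equal_replace_quotes := by
  intro line _
  unfold Spec_replace_quotes replace_quotes replace_quotes_alt
  rw [pvFoldA, pvSplitOnEq, pvMain line.toList false]
  simp
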